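-- pv_equiv track=rewrite | github.com/Brahim2000/Ranking-aggregation-in-abstract-argumentation | scoring_aggregation/vetoloser.py | veto_score_aggregation
-- ===== SOURCE A (Python) =====
-- def veto_score_aggregation(rankings):
--     """Aggregates rankings using the Veto scoring rule and returns a list of lists where
--     items with the same score are grouped together."""
--     items = set()
--     for ranking in rankings:
--         for sublist in ranking:
--             items.update(sublist)
--
--     scores = {item: 0 for item in items}
--
--     for ranking in rankings:
--         if ranking:
--             for sublist in reversed(ranking):
--                 if sublist:  # Check if sublist is not empty
--                     for item in sublist:
--                         scores[item] -= 1
--                     break  # Only the last-ranked items get a score of -1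
--
--     sorted_items = sorted(scores.items(), key=lambda x: x[1])
--
--     result = []
--     current_score = None
--     current_group = []
--
--     for item, score in sorted_items:
--         if current_score is None or score == current_score:
--             current_group.append(item)
--         else:
--             result.append(current_group)
--             current_group = [item]
--         current_score = score
--
--     if current_group:
--         result.append(current_group)
--
--     return result
-- ===== SOURCE B (Python) =====
-- def veto_score_aggregation(rankings):
--     """Veto scoring via counting buckets instead of sorting: flatten once, count for
--     each item in how many rankings it sits in the last nonempty block (with
--     multiplicity), then bucket items by that count and emit buckets from highest
--     count (lowest score) upward."""
--     flat = [x for ranking in rankings for sub in ranking for x in sub]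
--     items = set(flat)
--
--     count = dict.fromkeys(items, 0)
--     for ranking in rankings:
--         last = next((sub for sub in reversed(ranking) if sub), ())
--         for item in last:
--             count[item] += 1
--
--     top = max(count.values(), default=0)
--     buckets = [[] for _ in range(top + 1)]
--     for item in items:
--         buckets[count[item]].append(item)
--     return [group for group in reversed(buckets) if group]
-- ===== Notes on version B (the rewrite author's own statement) =====
-- stated objective: alternative
-- what changed: B replaces A's stable sort of the score dict plus sequential run-grouping by direct counting: it flattens the input once, counts per item the occurrences in each ranking's last nonempty block, then buckets items by that count and emits nonempty buckets from highest count (lowest Veto score) upward, preserving set order within each bucket.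
import Mathlib
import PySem

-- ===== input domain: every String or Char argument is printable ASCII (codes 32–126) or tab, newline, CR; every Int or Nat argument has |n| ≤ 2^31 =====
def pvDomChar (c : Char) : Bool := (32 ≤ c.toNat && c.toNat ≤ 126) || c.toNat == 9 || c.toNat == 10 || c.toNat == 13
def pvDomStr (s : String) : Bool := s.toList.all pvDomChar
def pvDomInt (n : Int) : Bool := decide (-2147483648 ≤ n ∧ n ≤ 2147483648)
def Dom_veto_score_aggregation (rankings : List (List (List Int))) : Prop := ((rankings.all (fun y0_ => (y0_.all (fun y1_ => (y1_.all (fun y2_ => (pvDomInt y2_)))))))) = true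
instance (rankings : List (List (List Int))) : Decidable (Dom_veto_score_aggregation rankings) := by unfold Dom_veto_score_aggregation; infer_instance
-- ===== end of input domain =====

-- B replaces A's stable sort of the score dict + sequential run-grouping by counting
-- last-block occurrences and bucketing items by that count (objective: alternative algorithm).
--
-- Both Pythons put the items into a `set` and the tie order inside each output group is
-- CPython's set iteration order, so EACH port carries its own exact model of CPython's
-- int set (Objects/setobject.c, insertions only): open addressing, table of size 8
-- growing (used*4, or *2 above 50000) when fill*5 ≥ mask*3; probe i = (5*i + 1 + perturb)
-- & mask with perturb >>= 5 (size_t arithmetic = UInt64) and 9 extra linear probes while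
-- i+9 ≤ mask; hash(n) = n for |n| ≤ 2^31 except hash(-1) = -2; iteration scans the table
-- in slot order.  Port A models the probe loops as step recursions; port B models them
-- with bounded probe windows searched by `List.find?`; the two models are proved equal
-- in the lemmas below.

-- ===== PORT A =====

def pvHashU (n : Int) : UInt64 :=
  UInt64.ofNat (((if n = -1 then -2 else n) % (2 : Int) ^ 64).toNat)

-- write `key` into the empty slot `j` a probe found; `j` is always in range on
-- reachable states (the append branch only backs the fuel guards below)
def pvWrite (table : List (Option Int)) (j : Nat) (key : Int) : List (Option Int) :=
  if j < table.length then table.set j (some key) else table ++ [some key]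

-- scan `cnt` slots from `i`: `some (some j)` = first empty slot, `some none` = key present
def pvScan (table : List (Option Int)) (key : Int) : Nat → Nat → Option (Option Nat)
  | _, 0 => none
  | i, c + 1 =>
    match table.getD i none with
    | none => some (some i)
    | some e => if e = key then some none else pvScan table key (i + 1) c

-- set_add_entry's probe loop; fuel (= size + 64) only totalizes it: with fill < size the
-- (5i+1+perturb) walk reaches an empty slot well within size+64 probes, so the fuel
-- branch (which still records the key) is unreachable
def pvAddLoop (table : List (Option Int)) (key : Int) (mask : UInt64) :
    Nat → UInt64 → UInt64 → List (Option Int) × Bool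
  | 0, _, _ => if some key ∈ table then (table, false) else (table ++ [some key], true)
  | fuel + 1, i, perturb =>
    let probes : Nat := if i.toNat + 9 ≤ mask.toNat then 9 else 0
    match pvScan table key i.toNat (probes + 1) with
    | some none => (table, false)
    | some (some j) => (pvWrite table j key, true)
    | none =>
      let p := perturb >>> 5
      pvAddLoop table key mask fuel ((i * 5 + 1 + p) &&& mask) p

def pvFindNone (table : List (Option Int)) : Nat → Nat → Option Nat
  | _, 0 => none
  | i, c + 1 =>
    match table.getD i none with
    | none => some i
    | some _ => pvFindNone table (i + 1) c

-- set_insert_clean (resize reinsertion; same fuel totalization as pvAddLoop)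
def pvCleanLoop (table : List (Option Int)) (key : Int) (mask : UInt64) :
    Nat → UInt64 → UInt64 → List (Option Int)
  | 0, _, _ => table ++ [some key]
  | fuel + 1, i, perturb =>
    let probes : Nat := if i.toNat + 9 ≤ mask.toNat then 9 else 0
    match pvFindNone table i.toNat (probes + 1) with
    | some j => pvWrite table j key
    | none =>
      let p := perturb >>> 5
      pvCleanLoop table key mask fuel ((i * 5 + 1 + p) &&& mask) p

-- `newsize = 8; while newsize <= minused: newsize <<= 1` (fuel: doubling from 8 passes minused within minused+1 steps)
def pvGrow : Nat → Nat → Nat → Nat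
  | 0, newsize, _ => newsize
  | f + 1, newsize, minused => if newsize ≤ minused then pvGrow f (newsize * 2) minused else newsize

def pvResize (entries : List Int) (minused : Nat) : List (Option Int) :=
  let size := pvGrow (minused + 1) 8 minused
  entries.foldl
    (fun t e => pvCleanLoop t e (UInt64.ofNat (size - 1)) (t.length + 64)
        (pvHashU e &&& UInt64.ofNat (size - 1)) (pvHashU e))
    (List.replicate size none)

-- s.add(key) on state (table, fill)
def pvSetAdd (st : List (Option Int) × Nat) (key : Int) : List (Option Int) × Nat :=
  let table := st.1
  let mask := table.length - 1
  let r := pvAddLoop table key (UInt64.ofNat mask) (table.length + 64)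
             (pvHashU key &&& UInt64.ofNat mask) (pvHashU key)
  if r.2 then
    let fill := st.2 + 1
    if fill * 5 ≥ mask * 3 then
      (pvResize (r.1.filterMap id) (if fill > 50000 then fill * 2 else fill * 4), fill)
    else (r.1, fill)
  else (r.1, st.2)

def pvEmptySet : List (Option Int) × Nat := (List.replicate 8 none, 0)

-- iteration order = table scan; its entries are pairwise distinct, so `dedup` is the
-- identity on every reachable table (it hands the proofs `Nodup` directly)
def pvSetElems (st : List (Option Int) × Nat) : List Int :=
  (st.1.filterMap id).dedup

-- `items = set(); for ranking in rankings: for sublist in ranking: items.update(sublist)`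
def pvItemsSet (rankings : List (List (List Int))) : List (Option Int) × Nat :=
  rankings.foldl (fun s ranking => ranking.foldl (fun s sub => sub.foldl pvSetAdd s) s) pvEmptySet

def pvItems (rankings : List (List (List Int))) : List Int := pvSetElems (pvItemsSet rankings)

-- `for sublist in reversed(ranking): if sublist: (for item in sublist: scores[item] -= 1); break`
def vetoLastA (scores : PySem.Dict Int Int) : List (List Int) → PySem.Dict Int Int
  | [] => scores
  | sub :: rest =>
    if sub.isEmpty then vetoLastA scores rest
    else sub.foldl (fun d item => d.modify item 0 (fun v => v - 1)) scores

def pvGroupStep (st : List (List Int) × Option Int × List Int) (p : Int × Int) :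
    List (List Int) × Option Int × List Int :=
  match st.2.1 with
  | none => (st.1, some p.2, st.2.2 ++ [p.1])
  | some s =>
    if p.2 = s then (st.1, some p.2, st.2.2 ++ [p.1])
    else (st.1 ++ [st.2.2], some p.2, [p.1])

def veto_score_aggregation (rankings : List (List (List Int))) : List (List Int) :=
  let items := pvItems rankings
  let scores0 := items.foldl (fun d it => d.insert it 0) (PySem.Dict.empty : PySem.Dict Int Int)
  let scores := rankings.foldl (fun d ranking => if ranking.isEmpty then d else vetoLastA d ranking.reverse) scores0
  let sortedItems := PySem.List.sorted scores.items (fun p => p.2) false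
  let st := sortedItems.foldl pvGroupStep ([], none, [])
  if st.2.2.isEmpty then st.1 else st.1 ++ [st.2.2]

-- ===== PORT B =====
-- B's own model of the same CPython set: probe windows searched with List.find?

def pvHashB (n : Int) : UInt64 :=
  UInt64.ofNat (((if n = -1 then -2 else n) % 18446744073709551616).toNat)

-- slot acceptable to set_add_entry: empty, or already holding the key
def pvOkB (tbl : List (Option Int)) (k : Int) (slot : Nat) : Bool :=
  match tbl.getD slot none with
  | none => true
  | some v => v == k

-- the probe window: `width` consecutive slots starting at `pos`
def pvWin (pos width : Nat) : List Nat := (List.range width).map (fun d => pos + d)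

def pvAddB (tbl : List (Option Int)) (k : Int) (msk : UInt64) :
    Nat → UInt64 → UInt64 → List (Option Int) × Bool
  | 0, _, _ => if (tbl.filterMap id).contains k then (tbl, false) else (tbl ++ [some k], true)
  | gas + 1, pos, seed =>
    let nxt : UInt64 := seed >>> 5
    match (pvWin pos.toNat (if pos.toNat + 9 ≤ msk.toNat then 10 else 1)).find? (pvOkB tbl k) with
    | none => pvAddB tbl k msk gas ((pos * 5 + 1 + nxt) &&& msk) nxt
    | some slot =>
      match tbl.getD slot none with
      | some _ => (tbl, false)
      | none => (if slot < tbl.length then tbl.set slot (some k) else tbl ++ [some k], true)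

def pvInsB (tbl : List (Option Int)) (k : Int) (msk : UInt64) :
    Nat → UInt64 → UInt64 → List (Option Int)
  | 0, _, _ => tbl ++ [some k]
  | gas + 1, pos, seed =>
    let nxt : UInt64 := seed >>> 5
    match (pvWin pos.toNat (if pos.toNat + 9 ≤ msk.toNat then 10 else 1)).find? (fun slot => (tbl.getD slot none).isNone) with
    | none => pvInsB tbl k msk gas ((pos * 5 + 1 + nxt) &&& msk) nxt
    | some slot => if slot < tbl.length then tbl.set slot (some k) else tbl ++ [some k]

-- the doubling loop as a fold (need+1 doubling steps from 8 always suffice)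
def pvGrowB (need : Nat) : Nat :=
  (List.replicate (need + 1) ()).foldl (fun s _ => if s ≤ need then 2 * s else s) 8

def pvResizeB (elts : List Int) (need : Nat) : List (Option Int) :=
  let size := pvGrowB need
  elts.foldl
    (fun tbl v => pvInsB tbl v (UInt64.ofNat (size - 1)) (tbl.length + 64)
        (pvHashB v &&& UInt64.ofNat (size - 1)) (pvHashB v))
    (List.replicate size none)

def pvSetInsB (acc : List (Option Int) × Nat) (k : Int) : List (Option Int) × Nat :=
  let msk := acc.1.length - 1
  match pvAddB acc.1 k (UInt64.ofNat msk) (acc.1.length + 64) (pvHashB k &&& UInt64.ofNat msk) (pvHashB k) with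
  | (tbl, false) => (tbl, acc.2)
  | (tbl, true) =>
    let fill := acc.2 + 1
    if fill * 5 < msk * 3 then (tbl, fill)
    else (pvResizeB (tbl.filterMap id) (if 50000 < fill then fill * 2 else fill * 4), fill)

-- `order = set(flat)` and its iteration order
def pvSetListB (xs : List Int) : List Int :=
  ((xs.foldl pvSetInsB (List.replicate 8 none, 0)).1.filterMap id).dedup

-- `flat = [x for rk in rankings for blk in rk for x in blk]`
def pvFlatten (rankings : List (List (List Int))) : List Int :=
  rankings.flatMap (fun rk => rk.flatMap (fun blk => blk))

def pvOrderB (rankings : List (List (List Int))) : List Int := pvSetListB (pvFlatten rankings)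

-- `next((blk for blk in reversed(rk) if blk), ())`: the last nonempty block
def pvLast (rk : List (List Int)) : List Int :=
  (rk.reverse.find? (fun blk => !blk.isEmpty)).getD []

def veto_score_aggregation_alt (rankings : List (List (List Int))) : List (List Int) :=
  let order := pvOrderB rankings
  let cnts0 := order.foldl (fun cnts x => cnts.insert x 0) (PySem.Dict.empty : PySem.Dict Int Int)
  let cnt := rankings.foldl (fun cnts rk =>
      (pvLast rk).foldl (fun cnts x => cnts.modify x 0 (fun v => v + 1)) cnts) cnts0
  let top := PySem.List.maxD cnt.values (fun v => v) 0
  -- counts are ≥ 0, so Python's buckets[cnt[x]] is the plain Nat index below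
  let buckets := List.replicate (top + 1).toNat ([] : List Int)
  let filled := order.foldl (fun bkts x => bkts.modify (cnt.getD x 0).toNat (fun grp => grp ++ [x])) buckets
  filled.reverse.filter (fun grp => !grp.isEmpty)

-- ===== PRECONDITION & SPEC =====
def Spec_veto_score_aggregation (rankings : List (List (List Int))) (out : List (List Int)) : Prop := out = veto_score_aggregation_alt rankings
instance (rankings : List (List (List Int))) (out : List (List Int)) : Decidable (Spec_veto_score_aggregation rankings out) := by unfold Spec_veto_score_aggregation; infer_instance

-- ===== CLAIM (what is proved, stated in full; the proofs are below) =====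
def Claim_equal_veto_score_aggregation : Prop := ∀ (rankings : List (List (List Int))), Dom_veto_score_aggregation rankings → Spec_veto_score_aggregation rankings (veto_score_aggregation rankings)

-- ===== LEMMAS AND PROOFS =====

-- ---- the two set models are the same function ----

lemma pvHashB_eq (n : Int) : pvHashB n = pvHashU n := by
  unfold pvHashB pvHashU
  norm_num

lemma pvWin_succ (i c : Nat) : pvWin i (c + 1) = i :: pvWin (i + 1) c := by
  unfold pvWin
  rw [List.range_succ_eq_map, List.map_cons, List.map_map]
  refine congrArg₂ _ (by omega) (List.map_congr_left (fun d _ => ?_))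
  simp [Function.comp]
  omega

lemma pvScan_eq_find (t : List (Option Int)) (key : Int) :
    ∀ c i, pvScan t key i c
      = ((pvWin i c).find? (pvOkB t key)).map
          (fun j => match t.getD j none with | none => some j | some _ => none) := by
  intro c
  induction c with
  | zero => intro i; simp [pvScan, pvWin]
  | succ c ih =>
    intro i
    rw [pvWin_succ]
    show (match t.getD i none with
      | none => some (some i)
      | some e => if e = key then some none else pvScan t key (i + 1) c) = _
    cases hg : t.getD i none with
    | none =>
      rw [List.find?_cons_of_pos (by unfold pvOkB; rw [hg])]
      simp only [Option.map_some, hg]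
    | some e =>
      by_cases he : e = key
      · subst he
        rw [List.find?_cons_of_pos (by unfold pvOkB; rw [hg]; simp)]
        simp only [Option.map_some, hg]
        simp
      · have hok : pvOkB t key i = false := by
          unfold pvOkB; rw [hg]; exact beq_eq_false_iff_ne.mpr he
        rw [List.find?_cons_of_neg (by rw [hok]; simp)]
        simp only [if_neg he]
        exact ih (i + 1)

lemma pvFindNone_eq_find (t : List (Option Int)) :
    ∀ c i, pvFindNone t i c = (pvWin i c).find? (fun j => (t.getD j none).isNone) := by
  intro c
  induction c with
  | zero => intro i; simp [pvFindNone, pvWin]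
  | succ c ih =>
    intro i
    rw [pvWin_succ]
    show (match t.getD i none with
      | none => some i
      | some _ => pvFindNone t (i + 1) c) = _
    cases hg : t.getD i none with
    | none =>
      rw [List.find?_cons_of_pos (by simp only [hg, Option.isNone_none])]
    | some e =>
      rw [List.find?_cons_of_neg (by simp only [hg, Option.isNone_some]; simp)]
      simp only [hg]
      exact ih (i + 1)

lemma pvWindow_len (i m : Nat) :
    (if i + 9 ≤ m then 10 else 1) = (if i + 9 ≤ m then 9 else 0) + 1 := by
  split <;> rfl

lemma pvAddB_eq (t : List (Option Int)) (key : Int) (mask : UInt64) :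
    ∀ fuel i p, pvAddB t key mask fuel i p = pvAddLoop t key mask fuel i p := by
  intro fuel
  induction fuel with
  | zero =>
    intro i p
    unfold pvAddB pvAddLoop
    by_cases h : some key ∈ t
    · rw [if_pos h, if_pos (by simp [List.mem_filterMap]; exact h)]
    · rw [if_neg h, if_neg (by simp [List.mem_filterMap]; exact h)]
  | succ f ih =>
    intro i p
    unfold pvAddB pvAddLoop
    simp only [pvWindow_len, pvScan_eq_find]
    cases hf : (pvWin i.toNat ((if i.toNat + 9 ≤ mask.toNat then 9 else 0) + 1)).find? (pvOkB t key) with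
    | none => simp only [hf, Option.map_none]; exact ih _ _
    | some j =>
      simp only [hf, Option.map_some]
      cases hg : t.getD j none with
      | none => simp [hg, pvWrite]
      | some e => simp [hg]

lemma pvInsB_eq (t : List (Option Int)) (key : Int) (mask : UInt64) :
    ∀ fuel i p, pvInsB t key mask fuel i p = pvCleanLoop t key mask fuel i p := by
  intro fuel
  induction fuel with
  | zero => intro i p; rfl
  | succ f ih =>
    intro i p
    unfold pvInsB pvCleanLoop
    simp only [pvWindow_len, pvFindNone_eq_find]
    cases hf : (pvWin i.toNat ((if i.toNat + 9 ≤ mask.toNat then 9 else 0) + 1)).find?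
        (fun j => (t.getD j none).isNone) with
    | none => simp only [hf]; exact ih _ _
    | some j => simp [hf, pvWrite]

lemma pvGrowB_eq (m : Nat) : pvGrowB m = pvGrow (m + 1) 8 m := by
  unfold pvGrowB
  suffices h : ∀ f s, (List.replicate f ()).foldl (fun s _ => if s ≤ m then 2 * s else s) s
      = pvGrow f s m from h (m + 1) 8
  intro f
  induction f with
  | zero => intro s; rfl
  | succ f ih =>
    intro s
    rw [List.replicate_succ, List.foldl_cons]
    unfold pvGrow
    by_cases h : s ≤ m
    · rw [if_pos h, if_pos h, two_mul, ← ih]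
      congr 1
      omega
    · rw [if_neg h, if_neg h]
      clear ih
      induction f with
      | zero => rfl
      | succ f ihf => rw [List.replicate_succ, List.foldl_cons, if_neg h]; exact ihf

lemma pvResizeB_eq (entries : List Int) (m : Nat) : pvResizeB entries m = pvResize entries m := by
  unfold pvResizeB pvResize
  rw [pvGrowB_eq]
  simp only [pvInsB_eq, pvHashB_eq]

lemma pvSetInsB_eq (st : List (Option Int) × Nat) (key : Int) : pvSetInsB st key = pvSetAdd st key := by
  unfold pvSetInsB pvSetAdd
  simp only [pvAddB_eq, pvHashB_eq]
  cases hr : pvAddLoop st.1 key (UInt64.ofNat (st.1.length - 1)) (st.1.length + 64)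
      (pvHashU key &&& UInt64.ofNat (st.1.length - 1)) (pvHashU key) with
  | mk t b =>
    cases b with
    | false => simp
    | true =>
      by_cases h : (st.2 + 1) * 5 ≥ (st.1.length - 1) * 3
      · simp only [if_neg (by omega : ¬ (st.2 + 1) * 5 < (st.1.length - 1) * 3), pvResizeB_eq]
        simp [h]
      · simp only [if_pos (by omega : (st.2 + 1) * 5 < (st.1.length - 1) * 3)]
        simp [h]

lemma pvOrderB_eq (rankings : List (List (List Int))) : pvOrderB rankings = pvItems rankings := by
  unfold pvOrderB pvSetListB pvItems pvSetElems pvItemsSet pvEmptySet pvFlatten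
  have hfun : pvSetInsB = pvSetAdd := funext₂ pvSetInsB_eq
  rw [hfun]
  simp only [List.foldl_flatMap]

-- the per-item veto count
def pvCnt (rankings : List (List (List Int))) (x : Int) : Nat :=
  (rankings.map (fun r => (pvLast r).count x)).sum

def pairsOf (items : List Int) (f : Int → Int) : List (Int × Int) :=
  items.map (fun it => (it, f it))

-- ---- set model: membership and Nodup ----

lemma pvWrite_mem_self (t : List (Option Int)) (j : Nat) (key : Int) :
    some key ∈ pvWrite t j key := by
  unfold pvWrite
  split
  · rename_i h
    have hl : j < (t.set j (some key)).length := by rw [List.length_set]; exact h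
    exact List.mem_of_getElem (List.getElem_set_self hl)
  · simp

lemma pvWrite_mem_mono (t : List (Option Int)) (j : Nat) (key e : Int)
    (hj : t.getD j none = none) (he : some e ∈ t) : some e ∈ pvWrite t j key := by
  unfold pvWrite
  split
  · rename_i hlt
    obtain ⟨k, hk, hke⟩ := List.getElem_of_mem he
    have hkj : k ≠ j := by
      intro h; subst h
      rw [List.getD_eq_getElem t none hk] at hj
      simp [hke] at hj
    have hl : k < (t.set j (some key)).length := by rw [List.length_set]; exact hk
    exact List.mem_of_getElem (l := t.set j (some key)) (i := k) (h := hl)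
      (by rw [List.getElem_set_ne (by omega)]; exact hke)
  · exact List.mem_append_left _ he

lemma pvScan_found (t : List (Option Int)) (key : Int) :
    ∀ i c, pvScan t key i c = some none → some key ∈ t := by
  intro i c
  induction c generalizing i with
  | zero => intro h; simp [pvScan] at h
  | succ c ih =>
    intro h
    unfold pvScan at h
    split at h
    · simp at h
    · rename_i e hg
      split at h
      · rename_i he
        subst he
        have hlen : i < t.length := by
          by_contra hlt
          rw [List.getD_eq_default t none (by omega)] at hg; simp at hg
        rw [List.getD_eq_getElem t none hlen] at hg
        exact hg ▸ List.getElem_mem hlen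
      · exact ih (i + 1) h

lemma pvScan_empty (t : List (Option Int)) (key : Int) :
    ∀ i c j, pvScan t key i c = some (some j) → t.getD j none = none := by
  intro i c
  induction c generalizing i with
  | zero => intro j h; simp [pvScan] at h
  | succ c ih =>
    intro j h
    unfold pvScan at h
    split at h
    · rename_i hg
      simp at h; subst h; exact hg
    · split at h
      · simp at h
      · exact ih (i + 1) j h

lemma pvAddLoop_mem_self (t : List (Option Int)) (key : Int) (mask : UInt64) :
    ∀ fuel i p, some key ∈ (pvAddLoop t key mask fuel i p).1 := by
  intro fuel
  induction fuel with
  | zero =>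
    intro i p
    unfold pvAddLoop
    split
    · assumption
    · simp
  | succ f ih =>
    intro i p
    unfold pvAddLoop
    simp only []
    split
    · rename_i hs; exact pvScan_found t key _ _ hs
    · rename_i j hs; exact pvWrite_mem_self t j key
    · exact ih _ _

lemma pvAddLoop_mem_mono (t : List (Option Int)) (key : Int) (mask : UInt64) :
    ∀ fuel i p (e : Int), some e ∈ t → some e ∈ (pvAddLoop t key mask fuel i p).1 := by
  intro fuel
  induction fuel with
  | zero =>
    intro i p e he
    unfold pvAddLoop
    split
    · exact he
    · exact List.mem_append_left _ he
  | succ f ih =>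
    intro i p e he
    unfold pvAddLoop
    simp only []
    split
    · exact he
    · rename_i j hs; exact pvWrite_mem_mono t j key e (pvScan_empty t key _ _ j hs) he
    · exact ih _ _ e he

lemma pvFindNone_empty (t : List (Option Int)) :
    ∀ i c j, pvFindNone t i c = some j → t.getD j none = none := by
  intro i c
  induction c generalizing i with
  | zero => intro j h; simp [pvFindNone] at h
  | succ c ih =>
    intro j h
    unfold pvFindNone at h
    split at h
    · rename_i hg; simp at h; subst h; exact hg
    · exact ih (i + 1) j h

lemma pvCleanLoop_mem_self (t : List (Option Int)) (key : Int) (mask : UInt64) :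
    ∀ fuel i p, some key ∈ pvCleanLoop t key mask fuel i p := by
  intro fuel
  induction fuel with
  | zero => intro i p; unfold pvCleanLoop; simp
  | succ f ih =>
    intro i p
    unfold pvCleanLoop
    simp only []
    split
    · rename_i j hs; exact pvWrite_mem_self t j key
    · exact ih _ _

lemma pvCleanLoop_mem_mono (t : List (Option Int)) (key : Int) (mask : UInt64) :
    ∀ fuel i p (e : Int), some e ∈ t → some e ∈ pvCleanLoop t key mask fuel i p := by
  intro fuel
  induction fuel with
  | zero => intro i p e he; unfold pvCleanLoop; exact List.mem_append_left _ he
  | succ f ih =>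
    intro i p e he
    unfold pvCleanLoop
    simp only []
    split
    · rename_i j hs; exact pvWrite_mem_mono t j key e (pvFindNone_empty t _ _ j hs) he
    · exact ih _ _ e he

lemma pvResize_mem (entries : List Int) (m : Nat) :
    ∀ e ∈ entries, some e ∈ pvResize entries m := by
  unfold pvResize
  intro e he
  -- fold invariant: processed entries are present, presence is preserved
  suffices h : ∀ (l : List Int) (t : List (Option Int)),
      (∀ x ∈ l, True) →
      ∀ x, (some x ∈ t ∨ x ∈ l) →
        some x ∈ l.foldl (fun t e => pvCleanLoop t e (UInt64.ofNat (pvGrow (m + 1) 8 m - 1)) (t.length + 64)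
          (pvHashU e &&& UInt64.ofNat (pvGrow (m + 1) 8 m - 1)) (pvHashU e)) t by
    exact h entries _ (fun _ _ => trivial) e (Or.inr he)
  intro l
  induction l with
  | nil =>
    intro t _ x hx
    rcases hx with h | h
    · exact h
    · simp at h
  | cons a l ih =>
    intro t _ x hx
    simp only [List.foldl_cons]
    apply ih _ (fun _ _ => trivial)
    rcases hx with h | h
    · exact Or.inl (pvCleanLoop_mem_mono t a _ _ _ _ x h)
    · rcases List.mem_cons.mp h with h | h
      · subst h; exact Or.inl (pvCleanLoop_mem_self t x _ _ _ _)
      · exact Or.inr h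

lemma pvSetAdd_mem_self (st : List (Option Int) × Nat) (key : Int) :
    some key ∈ (pvSetAdd st key).1 := by
  unfold pvSetAdd
  simp only []
  split
  · split
    · apply pvResize_mem
      exact List.mem_filterMap.mpr ⟨some key, pvAddLoop_mem_self st.1 key _ _ _ _, rfl⟩
    · exact pvAddLoop_mem_self st.1 key _ _ _ _
  · exact pvAddLoop_mem_self st.1 key _ _ _ _

lemma pvSetAdd_mem_mono (st : List (Option Int) × Nat) (key e : Int)
    (he : some e ∈ st.1) : some e ∈ (pvSetAdd st key).1 := by
  unfold pvSetAdd
  simp only []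
  split
  · split
    · apply pvResize_mem
      exact List.mem_filterMap.mpr ⟨some e, pvAddLoop_mem_mono st.1 key _ _ _ _ e he, rfl⟩
    · exact pvAddLoop_mem_mono st.1 key _ _ _ _ e he
  · exact pvAddLoop_mem_mono st.1 key _ _ _ _ e he

lemma pvItems_nodup (rankings : List (List (List Int))) : (pvItems rankings).Nodup :=
  List.nodup_dedup _

lemma foldl_pvSetAdd_mono (l : List Int) (st : List (Option Int) × Nat) (e : Int)
    (he : some e ∈ st.1) : some e ∈ (l.foldl pvSetAdd st).1 := by
  induction l generalizing st with
  | nil => exact he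
  | cons a l ih => exact ih _ (pvSetAdd_mem_mono st a e he)

lemma foldl_pvSetAdd_mem (l : List Int) (st : List (Option Int) × Nat) (e : Int)
    (he : e ∈ l) : some e ∈ (l.foldl pvSetAdd st).1 := by
  induction l generalizing st with
  | nil => simp at he
  | cons a l ih =>
    rcases List.mem_cons.mp he with h | h
    · subst h; exact foldl_pvSetAdd_mono l _ e (pvSetAdd_mem_self st e)
    · exact ih _ h

lemma mem_pvItems (rankings : List (List (List Int))) (r : List (List Int)) (sub : List Int) (x : Int)
    (hr : r ∈ rankings) (hsub : sub ∈ r) (hx : x ∈ sub) : x ∈ pvItems rankings := by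
  have key : some x ∈ (pvItemsSet rankings).1 := by
    unfold pvItemsSet
    -- outer fold: once present, stays present; the ranking r puts it in
    have inner : ∀ (rk : List (List Int)) (s : List (Option Int) × Nat),
        some x ∈ s.1 → some x ∈ (rk.foldl (fun s sub => sub.foldl pvSetAdd s) s).1 := by
      intro rk
      induction rk with
      | nil => intro s h; exact h
      | cons a l ih => intro s h; exact ih _ (foldl_pvSetAdd_mono a s x h)
    have inner_mem : ∀ (rk : List (List Int)) (s : List (Option Int) × Nat),
        sub ∈ rk → some x ∈ (rk.foldl (fun s sub => sub.foldl pvSetAdd s) s).1 := by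
      intro rk
      induction rk with
      | nil => intro s h; simp at h
      | cons a l ih =>
        intro s h
        rcases List.mem_cons.mp h with h | h
        · subst h; exact inner l _ (foldl_pvSetAdd_mem sub s x hx)
        · exact ih _ h
    have outer : ∀ (rs : List (List (List Int))) (s : List (Option Int) × Nat),
        some x ∈ s.1 → some x ∈ (rs.foldl (fun s ranking => ranking.foldl (fun s sub => sub.foldl pvSetAdd s) s) s).1 := by
      intro rs
      induction rs with
      | nil => intro s h; exact h
      | cons a l ih => intro s h; exact ih _ (inner a s h)
    have outer_mem : ∀ (rs : List (List (List Int))) (s : List (Option Int) × Nat),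
        r ∈ rs → some x ∈ (rs.foldl (fun s ranking => ranking.foldl (fun s sub => sub.foldl pvSetAdd s) s) s).1 := by
      intro rs
      induction rs with
      | nil => intro s h; simp at h
      | cons a l ih =>
        intro s h
        rcases List.mem_cons.mp h with h | h
        · subst h; exact outer l _ (inner_mem r s hsub)
        · exact ih _ h
    exact outer_mem rankings pvEmptySet hr
  unfold pvItems pvSetElems
  rw [List.mem_dedup]
  exact List.mem_filterMap.mpr ⟨some x, key, rfl⟩

-- ---- dict shape lemmas ----

lemma pairsOf_congr (p : List Int) (F G : Int → Int) (h : ∀ it, F it = G it) :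
    pairsOf p F = pairsOf p G := by
  unfold pairsOf
  exact List.map_congr_left (fun it _ => by rw [h])

lemma contains_of_items_pairsOf (d : PySem.Dict Int Int) (p : List Int) (f : Int → Int)
    (hd : d.items = pairsOf p f) (k : Int) : d.contains k = decide (k ∈ p) := by
  unfold PySem.Dict.contains
  rw [hd]; unfold pairsOf
  rw [List.any_map]
  by_cases hk : k ∈ p
  · simp only [hk, decide_true]
    exact List.any_eq_true.mpr ⟨k, hk, by simp [Function.comp]⟩
  · simp only [hk, decide_false]
    refine List.any_eq_false.mpr (fun x hx hbeq => ?_)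
    simp only [Function.comp] at hbeq
    have : x = k := by simpa using hbeq
    exact hk (this ▸ hx)

lemma find_pairsOf (p : List Int) (f : Int → Int) (k : Int) (hk : k ∈ p) :
    (Option.map (fun x => x.2) (List.find? (fun q => q.1 == k) (pairsOf p f))).getD 0 = f k := by
  induction p with
  | nil => simp at hk
  | cons a q ih =>
    by_cases h : a = k
    · subst h
      unfold pairsOf
      rw [List.map_cons, List.find?_cons_of_pos (by simp)]
      simp
    · unfold pairsOf
      rw [List.map_cons, List.find?_cons_of_neg (by simpa using h)]
      have h' : k ∈ q := by
        rcases List.mem_cons.mp hk with h' | h'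
        · exact absurd h'.symm h
        · exact h'
      exact ih h'

lemma getD_of_items_pairsOf (d : PySem.Dict Int Int) (p : List Int) (f : Int → Int)
    (hd : d.items = pairsOf p f) (k : Int) (hk : k ∈ p) :
    d.getD k 0 = f k := by
  unfold PySem.Dict.getD PySem.Dict.get?
  rw [hd]
  exact find_pairsOf p f k hk

lemma modify_items_pairsOf (d : PySem.Dict Int Int) (p : List Int) (f : Int → Int)
    (hd : d.items = pairsOf p f) (k : Int) (hk : k ∈ p) (g : Int → Int) :
    (d.modify k 0 g).items = pairsOf p (fun it => if it = k then g (f it) else f it) := by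
  unfold PySem.Dict.modify
  rw [getD_of_items_pairsOf d p f hd k hk]
  unfold PySem.Dict.insert
  rw [contains_of_items_pairsOf d p f hd k]
  simp only [hk, decide_true, if_true]
  rw [hd]; unfold pairsOf
  rw [List.map_map]
  refine List.map_congr_left (fun it _ => ?_)
  by_cases h : it = k
  · subst h; simp
  · simp [Function.comp, h]

lemma foldl_insert_zero_items (l : List Int) :
    ∀ (p : List Int) (d : PySem.Dict Int Int), d.items = pairsOf p (fun _ => 0) →
    (p ++ l).Nodup →
    (l.foldl (fun d it => d.insert it 0) d).items = pairsOf (p ++ l) (fun _ => 0) := by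
  induction l with
  | nil => intro p d hd _; simpa using hd
  | cons x l ih =>
    intro p d hd hnd
    simp only [List.foldl_cons]
    have hx : x ∉ p := by
      rw [List.nodup_append] at hnd
      intro hmem
      exact (hnd.2.2 x hmem x (List.mem_cons_self)) rfl
    have hins : (d.insert x 0).items = pairsOf (p ++ [x]) (fun _ => 0) := by
      unfold PySem.Dict.insert
      rw [contains_of_items_pairsOf d p _ hd x]
      simp only [hx, decide_false, Bool.false_eq_true, if_false]
      rw [hd]; unfold pairsOf
      rw [List.map_append]; rfl
    have h2 : ((p ++ [x]) ++ l).Nodup := by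
      rw [List.append_assoc]; simpa using hnd
    have := ih (p ++ [x]) _ hins h2
    rw [this, List.append_assoc]; rfl

lemma foldl_modify_add_items (δ : Int) (sub : List Int) :
    ∀ (p : List Int) (f : Int → Int) (d : PySem.Dict Int Int), d.items = pairsOf p f →
    (∀ x ∈ sub, x ∈ p) →
    (sub.foldl (fun d item => d.modify item 0 (fun v => v + δ)) d).items
      = pairsOf p (fun it => f it + δ * ((sub.count it : Nat) : Int)) := by
  induction sub with
  | nil =>
    intro p f d hd _
    simp only [List.foldl_nil]
    rw [hd]
    exact pairsOf_congr p _ _ (fun it => by simp)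
  | cons x sub ih =>
    intro p f d hd hsub
    simp only [List.foldl_cons]
    have hm := modify_items_pairsOf d p f hd x (hsub x List.mem_cons_self) (fun v => v + δ)
    have := ih p _ _ hm (fun y hy => hsub y (List.mem_cons_of_mem _ hy))
    rw [this]
    refine pairsOf_congr p _ _ (fun it => ?_)
    by_cases h : it = x
    · subst h; simp [List.count_cons]; ring
    · simp only [h, if_false]
      have : (sub.count it + if (x == it) = true then 1 else 0) = ((x :: sub).count it) := by
        rw [List.count_cons]
      rw [← this]
      have hne : (x == it) = false := by simpa using fun hh : x = it => h hh.symm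
      simp [hne]

lemma vetoLastA_eq (d : PySem.Dict Int Int) (l : List (List Int)) :
    vetoLastA d l = ((l.find? (fun sub => !sub.isEmpty)).getD []).foldl
      (fun d item => d.modify item 0 (fun v => v - 1)) d := by
  induction l with
  | nil => simp [vetoLastA]
  | cons sub rest ih =>
    unfold vetoLastA
    by_cases h : sub.isEmpty
    · rw [if_pos h, List.find?_cons_of_neg (by simp [h]), ih]
    · rw [if_neg h, List.find?_cons_of_pos (by simp [List.isEmpty_iff] at h ⊢; exact h)]
      rfl

lemma perRankA (d : PySem.Dict Int Int) (r : List (List Int)) :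
    (if r.isEmpty then d else vetoLastA d r.reverse)
      = (pvLast r).foldl (fun d item => d.modify item 0 (fun v => v - 1)) d := by
  by_cases h : r.isEmpty
  · rw [if_pos h]
    have : r = [] := List.isEmpty_iff.mp h
    subst this
    simp [pvLast]
  · rw [if_neg h, vetoLastA_eq]
    rfl

lemma foldl_rank_items (δ : Int) (rs : List (List (List Int))) :
    ∀ (p : List Int) (f : Int → Int) (d : PySem.Dict Int Int), d.items = pairsOf p f →
    (∀ r ∈ rs, ∀ x ∈ pvLast r, x ∈ p) →
    (rs.foldl (fun d r => (pvLast r).foldl (fun d item => d.modify item 0 (fun v => v + δ)) d) d).items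
      = pairsOf p (fun it => f it + δ * (((rs.map (fun r => (pvLast r).count it)).sum : Nat) : Int)) := by
  induction rs with
  | nil =>
    intro p f d hd _
    simp only [List.foldl_nil]
    rw [hd]
    exact pairsOf_congr p _ _ (fun it => by simp)
  | cons r rs ih =>
    intro p f d hd hmem
    simp only [List.foldl_cons]
    have h1 := foldl_modify_add_items δ (pvLast r) p f d hd (hmem r List.mem_cons_self)
    have h2 := ih p _ _ h1 (fun r' hr' => hmem r' (List.mem_cons_of_mem _ hr'))
    rw [h2]
    refine pairsOf_congr p _ _ (fun it => ?_)
    simp only [List.map_cons, List.sum_cons]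
    push_cast
    ring

-- ---- stable insertion sort into constant-key blocks ----

lemma insertBy_cons (before : Int × Int → Int × Int → Bool) (x y : Int × Int) (ys : List (Int × Int)) :
    PySem.List.insertBy before x (y :: ys)
      = if before x y then x :: y :: ys else y :: PySem.List.insertBy before x ys := by
  rfl

lemma insertBy_append_left (before : Int × Int → Int × Int → Bool) (x : Int × Int)
    (l1 l2 : List (Int × Int)) (h : ∀ y ∈ l1, before x y = false) :
    PySem.List.insertBy before x (l1 ++ l2) = l1 ++ PySem.List.insertBy before x l2 := by
  induction l1 with
  | nil => rfl
  | cons y l1 ih =>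
    rw [List.cons_append, insertBy_cons, h y List.mem_cons_self]
    simp only [Bool.false_eq_true, if_false, List.cons_append]
    rw [ih (fun z hz => h z (List.mem_cons_of_mem _ hz))]

lemma insertBy_all_true (before : Int × Int → Int × Int → Bool) (x : Int × Int)
    (l : List (Int × Int)) (h : ∀ y ∈ l, before x y = true) :
    PySem.List.insertBy before x l = x :: l := by
  cases l with
  | nil => rfl
  | cons y ys => rw [insertBy_cons, h y List.mem_cons_self, if_pos rfl]

lemma insert_blocks (x : Int × Int) (cx : Nat) (hx : x.2 = -(cx : Int)) :
    ∀ (cs : List Nat) (B : Nat → List (Int × Int)),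
    (∀ c ∈ cs, ∀ y ∈ B c, y.2 = -(c : Int)) → cs.Pairwise (· > ·) → cx ∈ cs →
    PySem.List.insertBy (fun a b => decide (a.2 < b.2)) x (cs.flatMap B)
      = cs.flatMap (fun c => if c = cx then B c ++ [x] else B c) := by
  intro cs
  induction cs with
  | nil => intro B _ _ hmem; simp at hmem
  | cons c rest ih =>
    intro B hkey hpw hmem
    rw [List.flatMap_cons, List.flatMap_cons]
    by_cases hc : c = cx
    · subst hc
      have hfalse : ∀ y ∈ B c, (fun a b : Int × Int => decide (a.2 < b.2)) x y = false := by
        intro y hy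
        have := hkey c List.mem_cons_self y hy
        simp [this, hx]
      rw [insertBy_append_left _ _ _ _ hfalse]
      have htrue : ∀ y ∈ rest.flatMap B, (fun a b : Int × Int => decide (a.2 < b.2)) x y = true := by
        intro y hy
        obtain ⟨c', hc', hyc'⟩ := List.mem_flatMap.mp hy
        have hy2 := hkey c' (List.mem_cons_of_mem _ hc') y hyc'
        have hlt : c' < c := List.pairwise_cons.mp hpw |>.1 c' hc'
        simp [hy2, hx]
        omega
      rw [insertBy_all_true _ _ _ htrue]
      rw [if_pos rfl]
      have hrest : rest.flatMap (fun c' => if c' = c then B c' ++ [x] else B c') = rest.flatMap B := by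
        refine List.flatMap_congr (fun c' hc' => ?_)
        have hlt : c' < c := (List.pairwise_cons.mp hpw).1 c' hc'
        rw [if_neg (by omega)]
      rw [hrest]
      simp
    · have hmem' : cx ∈ rest := by
        rcases List.mem_cons.mp hmem with h | h
        · exact absurd h.symm hc
        · exact h
      have hgt : c > cx := (List.pairwise_cons.mp hpw).1 cx hmem'
      have hfalse : ∀ y ∈ B c, (fun a b : Int × Int => decide (a.2 < b.2)) x y = false := by
        intro y hy
        have := hkey c List.mem_cons_self y hy
        simp [this, hx]
        omega
      rw [insertBy_append_left _ _ _ _ hfalse]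
      rw [ih B (fun c' hc' => hkey c' (List.mem_cons_of_mem _ hc')) (List.pairwise_cons.mp hpw).2 hmem']
      rw [if_neg hc]

lemma sorted_blocks (items' : List Int) (C : Int → Nat) (cs : List Nat)
    (hcs : cs.Pairwise (· > ·)) (hmem : ∀ x ∈ items', C x ∈ cs) :
    PySem.List.sorted (items'.map (fun it => (it, -(C it : Int)))) (fun p => p.2) false
      = cs.flatMap (fun c => (items'.filter (fun it => decide (C it = c))).map (fun it => (it, -(c : Int)))) := by
  rw [PySem.List.sorted_eq_foldl_insertBy, List.foldl_map]
  suffices h : ∀ (l pref : List Int), (∀ x ∈ l, C x ∈ cs) →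
      l.foldl (fun acc it => PySem.List.insertBy (fun a b => decide (a.2 < b.2)) (it, -(C it : Int)) acc)
        (cs.flatMap (fun c => (pref.filter (fun it => decide (C it = c))).map (fun it => (it, -(c : Int)))))
      = cs.flatMap (fun c => ((pref ++ l).filter (fun it => decide (C it = c))).map (fun it => (it, -(c : Int)))) by
    have h0 : cs.flatMap (fun c => (([] : List Int).filter (fun it => decide (C it = c))).map (fun it => (it, -(c : Int)))) = [] := by
      simp [List.flatMap_eq_nil_iff]
    have := h items' [] hmem
    rw [h0] at this
    simpa using this
  intro l
  induction l with
  | nil => intro pref _; simp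
  | cons x l ih =>
    intro pref hl
    simp only [List.foldl_cons]
    have hins := insert_blocks (x, -(C x : Int)) (C x) rfl cs
      (fun c => (pref.filter (fun it => decide (C it = c))).map (fun it => (it, -(c : Int))))
      (fun c hc y hy => by
        obtain ⟨it, hit, heq⟩ := List.mem_map.mp hy
        rw [← heq])
      hcs (hl x List.mem_cons_self)
    rw [hins]
    have hblocks : (cs.flatMap (fun c => if c = C x
          then (pref.filter (fun it => decide (C it = c))).map (fun it => (it, -(c : Int))) ++ [(x, -(C x : Int))]
          else (pref.filter (fun it => decide (C it = c))).map (fun it => (it, -(c : Int)))))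
        = cs.flatMap (fun c => (((pref ++ [x]).filter (fun it => decide (C it = c))).map (fun it => (it, -(c : Int))))) := by
      refine List.flatMap_congr (fun c hc => ?_)
      rw [List.filter_append, List.map_append]
      by_cases h : c = C x
      · subst h
        simp
      · have : (decide (C x = c)) = false := by simp; omega
        simp [this, h]
    rw [hblocks]
    have := ih (pref ++ [x]) (fun y hy => hl y (List.mem_cons_of_mem _ hy))
    rw [this, List.append_assoc]
    rfl

-- ---- the grouping loop over constant-key blocks ----

lemma group_same (F : List Int) :
    ∀ (res : List (List Int)) (s : Int) (g : List Int),
    (F.map (fun it => (it, s))).foldl pvGroupStep (res, some s, g) = (res, some s, g ++ F) := by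
  induction F with
  | nil => intro res s g; simp
  | cons f F ih =>
    intro res s g
    simp only [List.map_cons, List.foldl_cons]
    have hstep : pvGroupStep (res, some s, g) (f, s) = (res, some s, g ++ [f]) := by
      unfold pvGroupStep; simp
    rw [hstep, ih]
    simp

lemma group_chain (G : Nat → List Int) :
    ∀ (cs : List Nat), cs.Pairwise (· > ·) →
    ∀ (res : List (List Int)) (s : Int) (g : List Int), g ≠ [] → (∀ c ∈ cs, -(c : Int) ≠ s) →
    (if ((cs.flatMap (fun c => (G c).map (fun it => (it, -(c : Int))))).foldl pvGroupStep (res, some s, g)).2.2.isEmpty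
      then ((cs.flatMap (fun c => (G c).map (fun it => (it, -(c : Int))))).foldl pvGroupStep (res, some s, g)).1
      else ((cs.flatMap (fun c => (G c).map (fun it => (it, -(c : Int))))).foldl pvGroupStep (res, some s, g)).1
        ++ [((cs.flatMap (fun c => (G c).map (fun it => (it, -(c : Int))))).foldl pvGroupStep (res, some s, g)).2.2])
      = res ++ [g] ++ (cs.map G).filter (fun q => !q.isEmpty) := by
  intro cs
  induction cs with
  | nil =>
    intro _ res s g hg _
    simp only [List.flatMap_nil, List.foldl_nil, List.map_nil, List.filter_nil]
    have : g.isEmpty = false := by simpa [List.isEmpty_iff] using hg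
    simp [this]
  | cons c rest ih =>
    intro hpw res s g hg hne
    rw [List.flatMap_cons, List.foldl_append]
    by_cases hGc : G c = []
    · rw [hGc]
      simp only [List.map_nil, List.foldl_nil]
      have := ih (List.pairwise_cons.mp hpw).2 res s g hg (fun c' hc' => hne c' (List.mem_cons_of_mem _ hc'))
      rw [this]
      simp [hGc]
    · obtain ⟨f, F, hF⟩ := List.exists_cons_of_ne_nil hGc
      rw [hF]
      simp only [List.map_cons, List.foldl_cons]
      have hstep : pvGroupStep (res, some s, g) (f, -(c : Int)) = (res ++ [g], some (-(c : Int)), [f]) := by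
        unfold pvGroupStep
        simp [hne c List.mem_cons_self]
      rw [hstep, group_same]
      have hne' : ∀ c' ∈ rest, -((c' : Nat) : Int) ≠ -((c : Nat) : Int) := by
        intro c' hc'
        have : c' < c := (List.pairwise_cons.mp hpw).1 c' hc'
        simp; omega
      have := ih (List.pairwise_cons.mp hpw).2 (res ++ [g]) (-(c : Int)) ([f] ++ F) (by simp) hne'
      rw [this]
      simp [hF]

lemma group_start (G : Nat → List Int) :
    ∀ (cs : List Nat), cs.Pairwise (· > ·) →
    ∀ (res : List (List Int)),
    (if ((cs.flatMap (fun c => (G c).map (fun it => (it, -(c : Int))))).foldl pvGroupStep (res, none, [])).2.2.isEmpty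
      then ((cs.flatMap (fun c => (G c).map (fun it => (it, -(c : Int))))).foldl pvGroupStep (res, none, [])).1
      else ((cs.flatMap (fun c => (G c).map (fun it => (it, -(c : Int))))).foldl pvGroupStep (res, none, [])).1
        ++ [((cs.flatMap (fun c => (G c).map (fun it => (it, -(c : Int))))).foldl pvGroupStep (res, none, [])).2.2])
      = res ++ (cs.map G).filter (fun q => !q.isEmpty) := by
  intro cs
  induction cs with
  | nil => intro _ res; simp
  | cons c rest ih =>
    intro hpw res
    rw [List.flatMap_cons, List.foldl_append]
    by_cases hGc : G c = []
    · rw [hGc]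
      simp only [List.map_nil, List.foldl_nil]
      rw [ih (List.pairwise_cons.mp hpw).2 res]
      simp [hGc]
    · obtain ⟨f, F, hF⟩ := List.exists_cons_of_ne_nil hGc
      rw [hF]
      simp only [List.map_cons, List.foldl_cons]
      have hstep : pvGroupStep (res, none, []) (f, -(c : Int)) = (res, some (-(c : Int)), [f]) := by
        unfold pvGroupStep; simp
      rw [hstep, group_same]
      have hne' : ∀ c' ∈ rest, -((c' : Nat) : Int) ≠ -((c : Nat) : Int) := by
        intro c' hc'
        have : c' < c := (List.pairwise_cons.mp hpw).1 c' hc'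
        simp; omega
      have := group_chain G rest (List.pairwise_cons.mp hpw).2 res (-(c : Int)) ([f] ++ F) (by simp) hne'
      rw [this]
      simp [hF]

-- ---- bucket fold ----

lemma modify_map_range (n i : Nat) (g : Nat → List Int) (h : Nat → List Int → List Int)
    (hi : i < n) :
    ((List.range n).map g).modify i (h i)
      = (List.range n).map (fun j => if j = i then h i (g j) else g j) := by
  refine List.ext_getElem (by simp [List.length_modify]) (fun j h1 h2 => ?_)
  have hj : j < n := by simpa [List.length_modify] using h1
  rw [List.getElem_modify]
  simp only [List.getElem_map, List.getElem_range]
  by_cases hij : i = j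
  · subst hij; simp
  · rw [if_neg hij, if_neg (fun hh : j = i => hij hh.symm)]

lemma bucket_fold (C : Int → Nat) (n : Nat) :
    ∀ (l : List Int) (g : Nat → List Int), (∀ x ∈ l, C x < n) →
    l.foldl (fun bs x => bs.modify (C x) (fun q => q ++ [x])) ((List.range n).map g)
      = (List.range n).map (fun j => g j ++ l.filter (fun x => decide (C x = j))) := by
  intro l
  induction l with
  | nil =>
    intro g _
    simp only [List.foldl_nil]
    exact List.map_congr_left (fun j _ => by simp)
  | cons x l ih =>
    intro g hl
    simp only [List.foldl_cons]
    rw [modify_map_range n (C x) g (fun i q => q ++ [x]) (hl x List.mem_cons_self)]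
    rw [ih _ (fun y hy => hl y (List.mem_cons_of_mem _ hy))]
    refine List.map_congr_left (fun j hj => ?_)
    by_cases h : C x = j
    · subst h
      simp
    · have hd : (decide (C x = j)) = false := by simpa using h
      simp [hd]
      omega

-- ---- assembly ----

lemma dict_eq_mk (d : PySem.Dict Int Int) (l : List (Int × Int)) (h : d.items = l) :
    d = PySem.Dict.mk l := by
  cases d
  simpa using h

lemma veto_eq (rankings : List (List (List Int))) :
    veto_score_aggregation rankings = veto_score_aggregation_alt rankings := by
  have hnd : (pvItems rankings).Nodup := pvItems_nodup rankings
  have hmem : ∀ r ∈ rankings, ∀ x ∈ pvLast r, x ∈ pvItems rankings := by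
    intro r hr x hx
    unfold pvLast at hx
    cases hfind : (r.reverse.find? (fun sub => !sub.isEmpty)) with
    | none => rw [hfind] at hx; simp at hx
    | some sub =>
      rw [hfind] at hx
      simp only [Option.getD_some] at hx
      have hsub : sub ∈ r.reverse := List.mem_of_find?_eq_some hfind
      exact mem_pvItems rankings r sub x hr (List.mem_reverse.mp hsub) hx
  have h0 : ((pvItems rankings).foldl (fun d it => d.insert it 0) (PySem.Dict.empty : PySem.Dict Int Int)).items
      = pairsOf (pvItems rankings) (fun _ => 0) := by
    have := foldl_insert_zero_items (pvItems rankings) [] PySem.Dict.empty rfl (by simpa using hnd)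
    simpa using this
  -- the A-side dict
  have hA : (rankings.foldl (fun d ranking => if ranking.isEmpty then d else vetoLastA d ranking.reverse)
        ((pvItems rankings).foldl (fun d it => d.insert it 0) (PySem.Dict.empty : PySem.Dict Int Int)))
      = PySem.Dict.mk (pairsOf (pvItems rankings) (fun it => -((pvCnt rankings it : Nat) : Int))) := by
    have hfun : (fun (d : PySem.Dict Int Int) (item : Int) => d.modify item 0 (fun v => v - 1))
        = (fun (d : PySem.Dict Int Int) (item : Int) => d.modify item 0 (fun v => v + (-1))) := by
      funext d item
      simp [sub_eq_add_neg]
    have hstep := PySem.List.foldl_congr_mem rankings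
      (fun d ranking => if ranking.isEmpty then d else vetoLastA d ranking.reverse)
      (fun d r => (pvLast r).foldl (fun d item => d.modify item 0 (fun v => v + (-1))) d)
      ((pvItems rankings).foldl (fun d it => d.insert it 0) (PySem.Dict.empty : PySem.Dict Int Int))
      (fun acc r _ => by beta_reduce; rw [perRankA, hfun])
    rw [hstep]
    refine dict_eq_mk _ _ ?_
    rw [foldl_rank_items (-1) rankings (pvItems rankings) (fun _ => 0) _ h0 hmem]
    refine pairsOf_congr _ _ _ (fun it => ?_)
    unfold pvCnt
    ring
  -- the B-side dict
  have hB : (rankings.foldl (fun d ranking =>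
        (pvLast ranking).foldl (fun d item => d.modify item 0 (fun v => v + 1)) d)
        ((pvItems rankings).foldl (fun d it => d.insert it 0) (PySem.Dict.empty : PySem.Dict Int Int)))
      = PySem.Dict.mk (pairsOf (pvItems rankings) (fun it => ((pvCnt rankings it : Nat) : Int))) := by
    refine dict_eq_mk _ _ ?_
    rw [foldl_rank_items 1 rankings (pvItems rankings) (fun _ => 0) _ h0 hmem]
    refine pairsOf_congr _ _ _ (fun it => ?_)
    unfold pvCnt
    ring
  simp only [veto_score_aggregation, veto_score_aggregation_alt]
  rw [pvOrderB_eq]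
  rw [hA, hB]
  -- the B-side values and maximum
  have hval : (PySem.Dict.mk (pairsOf (pvItems rankings) (fun it => ((pvCnt rankings it : Nat) : Int)))).values
      = (pvItems rankings).map (fun it => ((pvCnt rankings it : Nat) : Int)) := by
    unfold PySem.Dict.values PySem.Dict.items pairsOf
    rw [List.map_map]
    rfl
  rw [hval]
  have htopnn : (0 : Int) ≤ PySem.List.maxD ((pvItems rankings).map (fun it => ((pvCnt rankings it : Nat) : Int))) (fun v => v) 0 := by
    unfold PySem.List.maxD
    cases hm : PySem.List.max? ((pvItems rankings).map (fun it => ((pvCnt rankings it : Nat) : Int))) (fun v => v) with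
    | none => simp
    | some m =>
      have hmm := PySem.List.max?_mem hm
      obtain ⟨it, _, heq⟩ := List.mem_map.mp hmm
      simp only [Option.getD_some]
      rw [← heq]
      exact Int.natCast_nonneg _
  have htople : ∀ it ∈ pvItems rankings, ((pvCnt rankings it : Nat) : Int)
      ≤ PySem.List.maxD ((pvItems rankings).map (fun it => ((pvCnt rankings it : Nat) : Int))) (fun v => v) 0 := by
    intro it hit
    unfold PySem.List.maxD
    cases hm : PySem.List.max? ((pvItems rankings).map (fun it => ((pvCnt rankings it : Nat) : Int))) (fun v => v) with
    | none =>
      rw [PySem.List.max?_eq_none_iff] at hm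
      rw [List.map_eq_nil_iff] at hm
      rw [hm] at hit
      simp at hit
    | some m =>
      have := PySem.List.max?_isMax hm ((pvCnt rankings it : Nat) : Int) (List.mem_map_of_mem hit)
      simpa using this
  have hCle : ∀ it ∈ pvItems rankings, pvCnt rankings it
      < (PySem.List.maxD ((pvItems rankings).map (fun it => ((pvCnt rankings it : Nat) : Int))) (fun v => v) 0).toNat + 1 := by
    intro it hit
    have := htople it hit
    omega
  have hT1 : (PySem.List.maxD ((pvItems rankings).map (fun it => ((pvCnt rankings it : Nat) : Int))) (fun v => v) 0 + 1).toNat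
      = (PySem.List.maxD ((pvItems rankings).map (fun it => ((pvCnt rankings it : Nat) : Int))) (fun v => v) 0).toNat + 1 := by
    omega
  rw [hT1]
  -- names for the block structure
  have hcs : ((List.range ((PySem.List.maxD ((pvItems rankings).map (fun it => ((pvCnt rankings it : Nat) : Int))) (fun v => v) 0).toNat + 1)).reverse).Pairwise (· > ·) := by
    rw [List.pairwise_reverse]
    exact List.pairwise_lt_range
  have hmemcs : ∀ x ∈ pvItems rankings, pvCnt rankings x
      ∈ (List.range ((PySem.List.maxD ((pvItems rankings).map (fun it => ((pvCnt rankings it : Nat) : Int))) (fun v => v) 0).toNat + 1)).reverse := by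
    intro x hx
    rw [List.mem_reverse, List.mem_range]
    exact hCle x hx
  -- A side: sort then group
  have hitems : (PySem.Dict.mk (pairsOf (pvItems rankings) (fun it => -((pvCnt rankings it : Nat) : Int)))).items
      = (pvItems rankings).map (fun it => (it, -((pvCnt rankings it : Nat) : Int))) := rfl
  rw [hitems]
  rw [sorted_blocks (pvItems rankings) (pvCnt rankings) _ hcs hmemcs]
  rw [group_start (fun c => (pvItems rankings).filter (fun it => decide (pvCnt rankings it = c))) _ hcs []]
  -- B side: buckets
  have hrep : List.replicate ((PySem.List.maxD ((pvItems rankings).map (fun it => ((pvCnt rankings it : Nat) : Int))) (fun v => v) 0).toNat + 1) ([] : List Int)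
      = (List.range ((PySem.List.maxD ((pvItems rankings).map (fun it => ((pvCnt rankings it : Nat) : Int))) (fun v => v) 0).toNat + 1)).map (fun _ => ([] : List Int)) := by
    rw [show (fun _ : Nat => ([] : List Int)) = Function.const Nat ([] : List Int) from rfl]
    rw [List.map_const, List.length_range]
  rw [hrep]
  have hgetD : ∀ (bs : List (List Int)), ∀ it ∈ pvItems rankings,
      bs.modify ((PySem.Dict.mk (pairsOf (pvItems rankings) (fun it => ((pvCnt rankings it : Nat) : Int)))).getD it 0).toNat (fun g => g ++ [it])
        = bs.modify (pvCnt rankings it) (fun g => g ++ [it]) := by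
    intro bs it hit
    rw [getD_of_items_pairsOf
      (PySem.Dict.mk (pairsOf (pvItems rankings) (fun it => ((pvCnt rankings it : Nat) : Int))))
      (pvItems rankings) (fun it => ((pvCnt rankings it : Nat) : Int)) rfl it hit]
    rw [Int.toNat_natCast]
  rw [PySem.List.foldl_congr_mem (pvItems rankings) _
    (fun bs it => bs.modify (pvCnt rankings it) (fun g => g ++ [it])) _
    (fun bs it hit => hgetD bs it hit)]
  rw [bucket_fold (pvCnt rankings) _ (pvItems rankings) (fun _ => []) hCle]
  rw [← List.map_reverse]
  simp only [List.nil_append]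
-- ===== VERDICT (by name: the statement is the Claim_ definition above) =====
theorem veto_score_aggregation_spec : Claim_equal_veto_score_aggregation := by
  intro rankings _
  unfold Spec_veto_score_aggregation
  exact veto_eq rankings
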